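-- pv_equiv track=rewrite | github.com/dimojenko/CTtools | driveCheckup/driveCheckup.py | parseFailPredict
-- ===== SOURCE A (Python) =====
-- def parseFailPredict(failPredictOutput):
--     failPredictLines = failPredictOutput.splitlines()
--     indices = []
--     summ = ""
--     for i, line in enumerate(failPredictLines):
--         if "Active" in line:
--             indices.append(int(i))
--     for index in indices:
--         summ = "\n".join(failPredictLines[index:index+5])
--         if not index == indices[-1]:
--             summ += "~~~~~~~~~~~~~~~~~~~~~~~~~~~~~~~~~~~~~~~~~~~~~~~~~~~~~~~~~~~~~~~~~~~~~~~~~~~~~~~~~~~~~~~~~~~~~~~~~~~~~~~~~~~~~~~~~~~~~~~~~~~~~~~~~~~~~~~~~~~~~~~~~~~~~~\n"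
--         else:
--             summ += "\n"
--     return summ
-- ===== SOURCE B (Python) =====
-- def parseFailPredict(failPredictOutput):
--     failPredictLines = failPredictOutput.splitlines()
--     for i in range(len(failPredictLines) - 1, -1, -1):
--         if "Active" in failPredictLines[i]:
--             return "\n".join(failPredictLines[i:i+5]) + "\n"
--     return ""
-- ===== Notes on version B (the rewrite author's own statement) =====
-- stated objective: simpler
-- what changed: Replaced the two-pass index-collecting loops (whose second loop overwrites summ so only the last 'Active' block survives) by a single reverse scan that returns at the first line containing 'Active', dropping the indices list and the dead separator branch.
import Mathlib
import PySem

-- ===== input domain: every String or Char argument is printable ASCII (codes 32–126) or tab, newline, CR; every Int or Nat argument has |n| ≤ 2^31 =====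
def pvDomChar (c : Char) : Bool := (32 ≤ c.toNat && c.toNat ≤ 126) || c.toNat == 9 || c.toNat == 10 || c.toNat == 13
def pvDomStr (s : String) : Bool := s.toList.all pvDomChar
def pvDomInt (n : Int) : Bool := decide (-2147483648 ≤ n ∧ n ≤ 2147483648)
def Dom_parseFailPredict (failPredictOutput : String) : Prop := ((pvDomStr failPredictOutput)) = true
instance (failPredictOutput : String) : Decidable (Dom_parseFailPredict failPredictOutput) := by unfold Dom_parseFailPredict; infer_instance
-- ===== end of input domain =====

-- B replaces A's two loops (collect all 'Active' indices, then a summ-overwriting join loop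
-- whose separator branch is dead in the final value) by one reverse scan returning the
-- 5-line block at the last 'Active' line; objective: simpler.

-- ===== PORT A =====
-- the 150-'~' separator line A appends after every non-final block
def pvSep : List Char := "~~~~~~~~~~~~~~~~~~~~~~~~~~~~~~~~~~~~~~~~~~~~~~~~~~~~~~~~~~~~~~~~~~~~~~~~~~~~~~~~~~~~~~~~~~~~~~~~~~~~~~~~~~~~~~~~~~~~~~~~~~~~~~~~~~~~~~~~~~~~~~~~~~~~~~\n".toList

def parseFailPredict (failPredictOutput : String) : String :=
  let failPredictLines := PySem.Chars.splitlines failPredictOutput.toList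
  let indices : List Int := (PySem.List.enumerate failPredictLines).foldl
    (fun acc p => if PySem.Chars.isIn "Active".toList p.2 then acc ++ [p.1] else acc) []
  let summ := indices.foldl
    (fun _summ index =>
      let s := PySem.Chars.join "\n".toList
        (PySem.List.slice failPredictLines (some index) (some (index + 5)))
      if !(index == PySem.List.pyGetD indices (-1) 0) then s ++ pvSep else s ++ "\n".toList)
    []
  String.ofList summ

-- ===== PORT B =====
-- B's loop: scan indices descending, return the block at the first match (early return)
def pvFindLast (failPredictLines : List (List Char)) : List Int → List Char
  | [] => []
  | i :: rest =>
    if PySem.Chars.isIn "Active".toList (PySem.List.pyGetD failPredictLines i []) then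
      PySem.Chars.join "\n".toList
        (PySem.List.slice failPredictLines (some i) (some (i + 5))) ++ "\n".toList
    else pvFindLast failPredictLines rest

def parseFailPredict_alt (failPredictOutput : String) : String :=
  let failPredictLines := PySem.Chars.splitlines failPredictOutput.toList
  String.ofList (pvFindLast failPredictLines
    (PySem.List.pyRange ((failPredictLines.length : Int) - 1) (-1) (-1)))

-- ===== PRECONDITION & SPEC =====
def Spec_parseFailPredict (failPredictOutput : String) (out : String) : Prop := out = parseFailPredict_alt failPredictOutput
instance (failPredictOutput : String) (out : String) : Decidable (Spec_parseFailPredict failPredictOutput out) := by unfold Spec_parseFailPredict; infer_instance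

-- ===== CLAIM (what is proved, stated in full; the proofs are below) =====
def Claim_equal_parseFailPredict : Prop := ∀ (failPredictOutput : String), Dom_parseFailPredict failPredictOutput → Spec_parseFailPredict failPredictOutput (parseFailPredict failPredictOutput)

-- ===== LEMMAS AND PROOFS =====

-- enumerate over a snoc appends the final indexed pair
theorem pv_enum_snoc (x : List Char) : ∀ (xs : List (List Char)) (s : Int),
    PySem.List.enumerate (xs ++ [x]) s =
      PySem.List.enumerate xs s ++ [(s + xs.length, x)] := by
  intro xs
  induction xs with
  | nil => intro s; simp [PySem.List.enumerate_cons, PySem.List.enumerate_nil]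
  | cons y ys ih =>
    intro s
    simp only [List.cons_append, PySem.List.enumerate_cons, ih (s+1), List.length_cons]
    push_cast; ring_nf

-- the index list A collects = the filtered range of positions, shifted by the start
theorem pv_filt_enum (P : List Char → Bool) (lines : List (List Char)) : ∀ s : Int,
    ((PySem.List.enumerate lines s).filter (fun q => P q.2)).map (·.1) =
      ((List.range lines.length).filter (fun j => P (lines.getD j []))).map
        (fun (j : Nat) => s + (j : Int)) := by
  induction lines using List.reverseRecOn with
  | nil => intro s; simp [PySem.List.enumerate_nil]
  | append_singleton ys y ih =>
    intro s
    rw [pv_enum_snoc, List.filter_append, List.map_append, List.length_append,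
      List.length_singleton, List.range_succ, List.filter_append, List.map_append]
    congr 1
    · rw [ih s]
      congr 1
      apply List.filter_congr
      intro j hj
      rw [List.getD_append _ _ _ _ (List.mem_range.mp hj)]
    · simp only [List.getD_eq_getElem?_getD, List.filter_cons]
      by_cases hy : P y <;> simp [hy]

-- B's countdown loop returns the rendered block of the LAST matching index below k
theorem pv_findLast_eq (lines : List (List Char)) : ∀ k : Nat,
    pvFindLast lines (PySem.List.pyRange ((k : Int) - 1) (-1) (-1)) =
      (match ((List.range k).filter
          (fun j => PySem.Chars.isIn "Active".toList (lines.getD j []))).getLast? with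
        | none => []
        | some j =>
          PySem.Chars.join "\n".toList
            (PySem.List.slice lines (some (j : Int)) (some ((j : Int) + 5))) ++ "\n".toList) := by
  intro k
  induction k with
  | zero =>
    rw [show ((0 : Nat) : Int) - 1 = -1 by norm_num,
      PySem.List.pyRange_neg_one_eq_nil (by norm_num)]
    rfl
  | succ k ih =>
    rw [show ((k + 1 : Nat) : Int) - 1 = (k : Int) by push_cast; ring,
      PySem.List.pyRange_neg_one_cons (by omega)]
    simp only [pvFindLast, PySem.List.pyGetD_natCast]
    rw [List.range_succ, List.filter_append, List.filter_cons, List.filter_nil]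
    by_cases hk : PySem.Chars.isIn "Active".toList (lines.getD k []) = true
    · rw [if_pos hk, if_pos hk, List.getLast?_concat]
    · rw [if_neg hk, if_neg hk, List.append_nil]
      exact ih

-- A's second loop overwrites summ: a foldl ignoring its accumulator yields g of the last element
theorem pv_foldl_const_last {α β : Type} (g : α → β) (init : β) (l : List α) :
    l.foldl (fun _ x => g x) init =
      (match l.getLast? with | none => init | some x => g x) := by
  induction l generalizing init with
  | nil => rfl
  | cons x xs ih =>
    rw [List.foldl_cons, ih]
    cases h : xs.getLast? with
    | none => simp [List.getLast?_eq_none_iff.mp h]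
    | some y => simp [List.getLast?_cons, h]

theorem pv_main (s : String) : parseFailPredict s = parseFailPredict_alt s := by
  unfold parseFailPredict parseFailPredict_alt
  dsimp only
  set lines := PySem.Chars.splitlines s.toList with hl
  rw [pv_findLast_eq lines lines.length]
  have hind : (PySem.List.enumerate lines).foldl
      (fun acc p => if PySem.Chars.isIn "Active".toList p.2 then acc ++ [p.1] else acc) [] =
      ((List.range lines.length).filter
        (fun j => PySem.Chars.isIn "Active".toList (lines.getD j []))).map
        (fun (j : Nat) => (j : Int)) := by
    rw [show (PySem.List.enumerate lines) = PySem.List.enumerate lines 0 from rfl]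
    have := PySem.List.foldl_append_if (f := (fun (q : Int × List Char) => q.1))
      (p := fun q => PySem.Chars.isIn "Active".toList q.2)
      (l := PySem.List.enumerate lines 0) (acc := [])
    rw [this, List.nil_append, pv_filt_enum _ lines 0]
    simp
  rw [hind, pv_foldl_const_last]
  rw [List.getLast?_map]
  cases hL : ((List.range lines.length).filter
      (fun j => PySem.Chars.isIn "Active".toList (lines.getD j []))).getLast? with
  | none => rfl
  | some j =>
    simp only [Option.map_some]
    have hne : (((List.range lines.length).filter
        (fun j => PySem.Chars.isIn "Active".toList (lines.getD j []))).map
        (fun (j : Nat) => (j : Int))) ≠ [] := by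
      rw [Ne, List.map_eq_nil_iff, ← List.getLast?_eq_none_iff, hL]
      simp
    rw [PySem.List.pyGetD_neg_one _ _ hne]
    have : (((List.range lines.length).filter
        (fun j => PySem.Chars.isIn "Active".toList (lines.getD j []))).map
        (fun (j : Nat) => (j : Int))).getLast hne = (j : Int) := by
      rw [List.getLast_eq_iff_getLast?_eq_some, List.getLast?_map, hL, Option.map_some]
    rw [this]
    simp

-- ===== VERDICT (by name: the statement is the Claim_ definition above) =====
theorem parseFailPredict_spec : Claim_equal_parseFailPredict := by
  intro s _
  unfold Spec_parseFailPredict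
  exact pv_main s
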